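-- pv_equiv track=rewrite | github.com/salvador-dali/hackerrank_ai | _training/nlp/__readme.py | generatePotentialWordFromWordWithMissingSymbols
-- ===== SOURCE A (Python) =====
-- def generatePotentialWordFromWordWithMissingSymbols(word):
--     # Having a word with a missing symbol #, generates all the potential words
--     from itertools import product
--
--     c, word_arr, all_words = word.count('#'), list(word), []
--     positions = [pos for pos, char in enumerate(word) if char == '#']
--
--     for letters in product('abcdefghijklmnopqrstuvwxyz', repeat=c):
--         for letter, pos in zip(letters, positions):
--             word_arr[pos] = letter
--         all_words.append(''.join(word_arr))
--
--     return all_words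
-- ===== SOURCE B (Python) =====
-- def generatePotentialWordFromWordWithMissingSymbols(word):
--     # Iteratively expand a list of prefixes over the word, left to right:
--     # an ordinary letter is appended to every prefix, a '#' branches every
--     # prefix over a-z (which reproduces itertools.product's order).
--     prefixes = [[]]
--     for ch in word:
--         if ch == '#':
--             prefixes = [p + [a] for p in prefixes for a in 'abcdefghijklmnopqrstuvwxyz']
--         else:
--             for p in prefixes:
--                 p.append(ch)
--     return [''.join(p) for p in prefixes]
-- ===== Notes on version B (the rewrite author's own statement) =====
-- stated objective: alternative
-- what changed: Replaces itertools.product over the wildcard count plus repeated in-place array overwriting with a direct recursion over the word that builds each output by appending to a prefix, branching a-z at every '#'.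
import Mathlib
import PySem

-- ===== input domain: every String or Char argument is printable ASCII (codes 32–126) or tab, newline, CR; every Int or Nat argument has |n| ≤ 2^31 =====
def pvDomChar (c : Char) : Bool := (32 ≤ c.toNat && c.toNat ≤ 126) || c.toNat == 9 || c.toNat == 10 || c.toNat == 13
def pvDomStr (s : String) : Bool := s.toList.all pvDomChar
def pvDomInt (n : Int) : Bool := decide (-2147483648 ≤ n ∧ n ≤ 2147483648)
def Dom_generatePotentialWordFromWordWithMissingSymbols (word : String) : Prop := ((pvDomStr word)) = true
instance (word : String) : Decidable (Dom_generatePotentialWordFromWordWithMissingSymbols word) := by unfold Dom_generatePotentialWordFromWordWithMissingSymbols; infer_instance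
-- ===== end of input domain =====

-- B replaces itertools.product + in-place array overwriting by a direct recursion
-- over the word building each output from a prefix (objective: alternative).

-- ===== PORT A =====
-- itertools.product('abcdefghijklmnopqrstuvwxyz', repeat=n): all length-n tuples,
-- rightmost position varying fastest (leftmost outermost), as lists of chars.
def pyProduct (n : Nat) : List (List Char) :=
  match n with
  | 0 => [([] : List Char)]
  | n + 1 => "abcdefghijklmnopqrstuvwxyz".toList.flatMap (fun a => (pyProduct n).map (a :: ·))

def generatePotentialWordFromWordWithMissingSymbols (word : String) : List String :=
  let c : Nat := PySem.Str.count word "#"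
  let word_arr : List Char := word.toList
  let all_words : List String := []
  let positions : List Int :=
    (PySem.List.enumerate word.toList 0).filterMap (fun pc => if pc.2 = '#' then some pc.1 else none)
  -- for letters in product(...): for letter, pos in zip(letters, positions): word_arr[pos] = letter
  -- ''.join(word_arr) over a list of single chars is exactly String.mk
  let res :=
    (pyProduct c).foldl
      (fun (st : List String × List Char) letters =>
        let arr := (letters.zip positions).foldl
          (fun a lp => PySem.List.pySetD a lp.2 lp.1) st.2
        (st.1 ++ [String.mk arr], arr))
      (all_words, word_arr)
  res.1

-- ===== PORT B =====
-- prefixes are carried as char lists (p.append(ch) / p + [a] act on them;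
-- the in-place append is ported by its value, map (· ++ [ch])); ''.join(p) = String.mk p
def generatePotentialWordFromWordWithMissingSymbols_alt (word : String) : List String :=
  (word.toList.foldl
      (fun prefixes ch =>
        if ch = '#' then
          prefixes.flatMap (fun p => "abcdefghijklmnopqrstuvwxyz".toList.map (fun a => p ++ [a]))
        else
          prefixes.map (fun p => p ++ [ch]))
      [([] : List Char)]).map (fun p => String.mk p)

-- ===== PRECONDITION & SPEC =====
def Spec_generatePotentialWordFromWordWithMissingSymbols (word : String) (out : List String) : Prop := out = generatePotentialWordFromWordWithMissingSymbols_alt word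
instance (word : String) (out : List String) : Decidable (Spec_generatePotentialWordFromWordWithMissingSymbols word out) := by unfold Spec_generatePotentialWordFromWordWithMissingSymbols; infer_instance

-- ===== CLAIM (what is proved, stated in full; the proofs are below) =====
def Claim_equal_generatePotentialWordFromWordWithMissingSymbols : Prop := ∀ (word : String), Dom_generatePotentialWordFromWordWithMissingSymbols word → Spec_generatePotentialWordFromWordWithMissingSymbols word (generatePotentialWordFromWordWithMissingSymbols word)

-- ===== LEMMAS AND PROOFS =====

-- the '#'-positions of a word, as Nat indices
def posN : List Char → List Nat
  | [] => []
  | c :: t => if c = '#' then 0 :: (posN t).map (· + 1) else (posN t).map (· + 1)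

-- substitute the letters for the '#'s, left to right
def fillW : List Char → List Char → List Char
  | [], _ => []
  | c :: rs, ls =>
    if c = '#' then
      match ls with
      | l :: ls' => l :: fillW rs ls'
      | [] => c :: fillW rs []
    else c :: fillW rs ls

-- the inner assignment loop of A, in Nat-index form
def setZ (ls : List Char) (ps : List Nat) (arr : List Char) : List Char :=
  (ls.zip ps).foldl (fun a lp => a.set lp.2 lp.1) arr

lemma length_mem_pyProduct {n : Nat} {ls : List Char} (h : ls ∈ pyProduct n) : ls.length = n := by
  induction n generalizing ls with
  | zero => simp [pyProduct] at h; simp [h]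
  | succ n ih =>
    rw [pyProduct, List.mem_flatMap] at h
    obtain ⟨a, -, h2⟩ := h
    rw [List.mem_map] at h2
    obtain ⟨ls', hls', rfl⟩ := h2
    simp [ih hls']

lemma count_go_hash : ∀ (fuel : Nat) (l : List Char) (acc : Nat), l.length ≤ fuel →
    PySem.Chars.count.go ['#'] fuel l acc = acc + l.count '#' := by
  intro fuel
  induction fuel with
  | zero => intro l acc h; interval_cases hl : l.length; · simp_all [PySem.Chars.count.go, List.length_eq_zero_iff.mp hl]
  | succ n ih =>
    intro l acc h
    cases l with
    | nil => simp [PySem.Chars.count.go]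
    | cons c t =>
      by_cases hc : c = '#'
      · subst hc
        rw [show PySem.Chars.count.go ['#'] (n+1) ('#' :: t) acc =
            PySem.Chars.count.go ['#'] n t (acc + 1) by simp [PySem.Chars.count.go, List.isPrefixOf]]
        rw [ih t (acc + 1) (by simpa using h)]
        simp [List.count_cons]; omega
      · rw [show PySem.Chars.count.go ['#'] (n+1) (c :: t) acc =
            PySem.Chars.count.go ['#'] n t acc by simp [PySem.Chars.count.go, List.isPrefixOf, Ne.symm hc]]
        rw [ih t acc (by simpa using h)]
        simp [List.count_cons, hc]

lemma count_hash (w : String) : PySem.Str.count w "#" = w.toList.count '#' := by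
  have h := count_go_hash w.toList.length w.toList 0 le_rfl
  simpa [PySem.Str.count_eq, PySem.Chars.count] using h

lemma positions_eq (l : List Char) (s : Int) :
    (PySem.List.enumerate l s).filterMap (fun pc => if pc.2 = '#' then some pc.1 else none)
      = (posN l).map (fun n : Nat => s + (n : Int)) := by
  induction l generalizing s with
  | nil => simp [PySem.List.enumerate_nil, posN]
  | cons c t ih =>
    rw [PySem.List.enumerate_cons, List.filterMap_cons, ih (s + 1)]
    by_cases hc : c = '#' <;>
      simp [posN, hc, List.map_map, Function.comp] <;>
      (intro a _; push_cast; ring)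

lemma setZ_shift (ls : List Char) : ∀ (ps : List Nat) (a : Char) (w : List Char),
    setZ ls (ps.map (· + 1)) (a :: w) = a :: setZ ls ps w := by
  induction ls with
  | nil => intro ps a w; simp [setZ]
  | cons l lt ih =>
    intro ps a w
    cases ps with
    | nil => simp [setZ]
    | cons p pt => simpa [setZ, List.foldl_cons] using ih pt a (w.set p l)

lemma fill_replicate (w : List Char) : fillW w (List.replicate (w.count '#') '#') = w := by
  induction w with
  | nil => simp [fillW]
  | cons c t ih =>
    by_cases hc : c = '#' <;> simp [fillW, hc, List.count_cons, ih, List.replicate_succ]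

lemma setZ_fill : ∀ (w ls ls' : List Char), ls.length = w.count '#' → ls'.length = w.count '#' →
    setZ ls (posN w) (fillW w ls') = fillW w ls := by
  intro w
  induction w with
  | nil => intro ls ls' h h'; simp [posN, setZ, fillW]
  | cons c t ih =>
    intro ls ls' h h'
    by_cases hc : c = '#'
    · subst hc
      simp [List.count_cons] at h h'
      cases ls with
      | nil => simp at h
      | cons l lt =>
        cases ls' with
        | nil => simp at h'
        | cons l' lt' =>
          simp at h h'
          have h1 : setZ (l :: lt) (posN ('#' :: t)) (fillW ('#' :: t) (l' :: lt'))
              = setZ lt ((posN t).map (· + 1)) (l :: fillW t lt') := by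
            simp [posN, fillW, setZ, List.foldl_cons]
          rw [h1, setZ_shift, ih lt lt' h h']
          simp [fillW]
    · have hcount : List.count '#' (c :: t) = List.count '#' t := by
        simp [List.count_cons, hc]
      rw [hcount] at h h'
      have h0 : fillW (c :: t) ls' = c :: fillW t ls' := by simp [fillW, hc]
      have h1 : fillW (c :: t) ls = c :: fillW t ls := by simp [fillW, hc]
      rw [h0, h1, show posN (c :: t) = (posN t).map (· + 1) by simp [posN, hc],
        setZ_shift, ih ls ls' h h']

lemma foldSet_bridge (ls : List Char) (ps : List Nat) (arr : List Char) :
    ((ls.zip (ps.map (fun n : Nat => (n : Int)))).foldl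
        (fun a lp => PySem.List.pySetD a lp.2 lp.1) arr) = setZ ls ps arr := by
  rw [List.zip_map_right, List.foldl_map]
  simp [setZ, PySem.List.pySetD_natCast]

lemma foldA (w : List Char) : ∀ (L : List (List Char)) (acc : List String) (arr ls0 : List Char),
    (∀ ls ∈ L, ls.length = w.count '#') → ls0.length = w.count '#' → arr = fillW w ls0 →
    (L.foldl
        (fun (st : List String × List Char) letters =>
          (st.1 ++ [String.mk (setZ letters (posN w) st.2)], setZ letters (posN w) st.2))
        (acc, arr)).1
      = acc ++ L.map (fun ls => String.mk (fillW w ls)) := by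
  intro L
  induction L with
  | nil => intro acc arr ls0 _ _ _; simp
  | cons letters L ih =>
    intro acc arr ls0 hL h0 harr
    have hlen : letters.length = w.count '#' := hL _ (by simp)
    rw [List.foldl_cons]
    simp only [harr, setZ_fill w letters ls0 hlen h0]
    rw [ih (acc ++ [String.mk (fillW w letters)]) _ letters (fun ls hls => hL ls (by simp [hls])) hlen rfl]
    simp

lemma foldB_eq : ∀ (rest : List Char) (P : List (List Char)),
    rest.foldl
        (fun prefixes ch =>
          if ch = '#' then
            prefixes.flatMap (fun p => "abcdefghijklmnopqrstuvwxyz".toList.map (fun a => p ++ [a]))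
          else
            prefixes.map (fun p => p ++ [ch]))
        P
      = P.flatMap (fun p => (pyProduct (rest.count '#')).map (fun ls => p ++ fillW rest ls)) := by
  intro rest
  induction rest with
  | nil => intro P; simp [pyProduct, fillW]
  | cons c t ih =>
    intro P
    rw [List.foldl_cons]
    by_cases hc : c = '#'
    · subst hc
      rw [if_pos rfl, ih]
      rw [show ('#' :: t).count '#' = t.count '#' + 1 by simp [List.count_cons]]
      simp only [pyProduct, List.flatMap_assoc, List.flatMap_map, List.map_flatMap,
        List.map_map, Function.comp]
      refine List.flatMap_congr (fun p _ => ?_)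
      refine List.flatMap_congr (fun a _ => ?_)
      refine List.map_congr_left (fun ls _ => ?_)
      simp [fillW, List.append_assoc]
    · rw [if_neg hc, ih]
      rw [show (c :: t).count '#' = t.count '#' by simp [List.count_cons, hc]]
      rw [List.flatMap_map]
      refine List.flatMap_congr (fun p _ => ?_)
      refine List.map_congr_left (fun ls _ => ?_)
      simp [fillW, hc, List.append_assoc]

-- ===== VERDICT (by name: the statement is the Claim_ definition above) =====
theorem generatePotentialWordFromWordWithMissingSymbols_spec : Claim_equal_generatePotentialWordFromWordWithMissingSymbols := by
  intro word _
  show _ = _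
  unfold generatePotentialWordFromWordWithMissingSymbols generatePotentialWordFromWordWithMissingSymbols_alt
  simp only [count_hash, positions_eq word.toList 0]
  simp only [show (fun n : Nat => (0 : Int) + (n : Int)) = (fun n : Nat => (n : Int)) by funext n; ring]
  simp only [foldSet_bridge]
  rw [foldB_eq]
  rw [foldA word.toList (pyProduct (word.toList.count '#')) [] word.toList
      (List.replicate (word.toList.count '#') '#')
      (fun ls hls => length_mem_pyProduct hls) (by simp)
      (fill_replicate word.toList).symm]
  simp [List.map_map]
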